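-- pv_equiv track=rewrite | github.com/louisna/LINGI2364-MiningPattern | Project3-Classifying Graphs/main.py | create_fm_col
-- ===== SOURCE A (Python) =====
-- def create_fm_col(all_gids, subset_gids):
--     subset_gids = set(subset_gids)
--     bools = []
--     for i, val in enumerate(all_gids):
--         if val in subset_gids:
--             bools.append(1)
--         else:
--             bools.append(0)
--     return bools
-- ===== SOURCE B (Python) =====
-- def create_fm_col(all_gids, subset_gids):
--     # Inverted index: value -> list of positions in all_gids
--     index = {}
--     for i, val in enumerate(all_gids):
--         index.setdefault(val, []).append(i)
--     result = [0] * len(all_gids)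
--     for val in set(subset_gids):
--         for pos in index.get(val, []):
--             result[pos] = 1
--     return result
-- ===== Notes on version B (the rewrite author's own statement) =====
-- stated objective: alternative
-- what changed: Instead of scanning all_gids and testing membership in a set of subset_gids, B builds an inverted index from each gid to its positions and marks those positions in a zero-initialised result while iterating over subset_gids.
import Mathlib
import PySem

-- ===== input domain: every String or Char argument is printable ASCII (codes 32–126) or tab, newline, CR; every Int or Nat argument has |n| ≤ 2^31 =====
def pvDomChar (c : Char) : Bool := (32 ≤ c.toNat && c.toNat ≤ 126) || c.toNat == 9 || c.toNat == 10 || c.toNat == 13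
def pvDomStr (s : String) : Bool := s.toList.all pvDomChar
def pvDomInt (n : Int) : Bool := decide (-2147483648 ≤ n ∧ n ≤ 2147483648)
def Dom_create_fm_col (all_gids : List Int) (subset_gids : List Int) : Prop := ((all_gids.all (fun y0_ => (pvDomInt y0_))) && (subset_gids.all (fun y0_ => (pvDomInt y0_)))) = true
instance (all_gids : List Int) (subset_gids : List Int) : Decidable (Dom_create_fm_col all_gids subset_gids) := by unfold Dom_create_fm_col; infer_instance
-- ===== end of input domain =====

-- B replaces the membership-test scan of all_gids by an inverted index (gid -> positions)
-- and marks positions while iterating over subset_gids; alternative decomposition, same cost.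

-- ===== PORT A =====
def create_fm_col (all_gids : List Int) (subset_gids : List Int) : List Int :=
  let s := PySem.Set.ofList subset_gids
  (PySem.List.enumerate all_gids).foldl
    (fun bools p => if PySem.Set.contains s p.2 then bools ++ [(1 : Int)] else bools ++ [(0 : Int)])
    []

-- ===== PORT B =====
def create_fm_col_alt (all_gids : List Int) (subset_gids : List Int) : List Int :=
  let index : PySem.Dict Int (List Int) :=
    (PySem.List.enumerate all_gids).foldl
      (fun d p => d.insert p.2 (d.getD p.2 [] ++ [p.1])) PySem.Dict.empty
  let result := PySem.List.pyRepeat [(0 : Int)] (all_gids.length : Int)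
  (PySem.Set.ofList subset_gids).foldl
    (fun r v => (index.getD v []).foldl (fun r pos => PySem.List.pySetD r pos 1) r)
    result

-- ===== PRECONDITION & SPEC =====
def Spec_create_fm_col (all_gids : List Int) (subset_gids : List Int) (out : List Int) : Prop := out = create_fm_col_alt all_gids subset_gids
instance (all_gids : List Int) (subset_gids : List Int) (out : List Int) : Decidable (Spec_create_fm_col all_gids subset_gids out) := by unfold Spec_create_fm_col; infer_instance

-- ===== CLAIM (what is proved, stated in full; the proofs are below) =====
def Claim_equal_create_fm_col : Prop := ∀ (all_gids : List Int) (subset_gids : List Int), Dom_create_fm_col all_gids subset_gids → Spec_create_fm_col all_gids subset_gids (create_fm_col all_gids subset_gids)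

-- ===== LEMMAS AND PROOFS =====

-- A's fold appends one mask bit per element of the enumerated list.
theorem foldA_eq_map (c : Int → Bool) (l : List (Int × Int)) (acc : List Int) :
    l.foldl (fun bools p => if c p.2 then bools ++ [(1 : Int)] else bools ++ [(0 : Int)]) acc
      = acc ++ l.map (fun p => if c p.2 then (1 : Int) else 0) := by
  induction l generalizing acc with
  | nil => simp
  | cons p l ih => by_cases h : c p.2 <;> simp [h, ih]

theorem createA_eq_map (all_gids subset_gids : List Int) :
    create_fm_col all_gids subset_gids
      = all_gids.map (fun v => if v ∈ subset_gids then (1 : Int) else 0) := by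
  unfold create_fm_col
  rw [foldA_eq_map]
  simp only [List.nil_append]
  have : ∀ p : Int × Int,
      (if PySem.Set.contains (PySem.Set.ofList subset_gids) p.2 then (1 : Int) else 0)
        = (if p.2 ∈ subset_gids then (1 : Int) else 0) := by
    intro p
    by_cases h : p.2 ∈ subset_gids <;>
      simp [PySem.Set.contains, PySem.Set.mem_ofList, h]
  rw [List.map_congr_left (fun p _ => this p)]
  have h2 := congrArg (List.map (fun v => if v ∈ subset_gids then (1 : Int) else 0))
    (PySem.List.map_snd_enumerate all_gids 0)
  rw [List.map_map] at h2
  simpa [Function.comp] using h2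

-- The index built by B's first loop: contents of one bucket.
theorem build_getD (l : List (Int × Int)) (d : PySem.Dict Int (List Int)) (v : Int) :
    (l.foldl (fun d p => d.insert p.2 (d.getD p.2 [] ++ [p.1])) d).getD v []
      = d.getD v [] ++ l.filterMap (fun p => if p.2 = v then some p.1 else none) := by
  induction l generalizing d with
  | nil => simp
  | cons p l ih =>
    simp only [List.foldl_cons, ih]
    by_cases h : p.2 = v
    · subst h
      rw [PySem.Dict.getD_insert_self]
      simp
    · rw [PySem.Dict.getD_insert_of_ne _ _ _ (Ne.symm h)]
      simp [h]

theorem mem_bucket (all_gids : List Int) (v : Int) (i : Int) :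
    (i ∈ ((PySem.List.enumerate all_gids).foldl
        (fun d p => d.insert p.2 (d.getD p.2 [] ++ [p.1])) PySem.Dict.empty).getD v [])
      ↔ ∃ k : Nat, ∃ h : k < all_gids.length, i = (k : Int) ∧ all_gids[k] = v := by
  rw [build_getD]
  have h0 : (PySem.Dict.empty : PySem.Dict Int (List Int)).getD v [] = [] := rfl
  rw [h0, List.nil_append]
  constructor
  · intro hmem
    rcases List.mem_filterMap.mp hmem with ⟨p, hp, hpv⟩
    by_cases h : p.2 = v
    · rcases (PySem.List.mem_enumerate_iff _ _ _).mp hp with ⟨k, hk, hpk⟩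
      have hp1 : p.1 = i := by
        simp [h] at hpv
        exact hpv
      refine ⟨k, hk, ?_, ?_⟩
      · rw [← hp1, hpk]
        simp
      · rw [← h, hpk]
    · simp [h] at hpv
  · rintro ⟨k, hk, rfl, hkv⟩
    have hp : ((k : Int), all_gids[k]) ∈ PySem.List.enumerate all_gids :=
      (PySem.List.mem_enumerate_iff _ _ _).mpr ⟨k, hk, by simp⟩
    have : (k : Int) ∈ (PySem.List.enumerate all_gids).filterMap
        (fun p => if p.2 = v then some p.1 else none) :=
      List.mem_filterMap.mpr ⟨((k : Int), all_gids[k]), hp, by simp [hkv]⟩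
    simpa using this

-- Marking loops preserve length.
theorem length_mark_list (ps : List Int) (r : List Int) :
    (ps.foldl (fun r pos => PySem.List.pySetD r pos 1) r).length = r.length := by
  induction ps generalizing r with
  | nil => rfl
  | cons p ps ih => simp [ih, PySem.List.length_pySetD]

theorem length_mark_all (idx : Int → List Int) (sub : List Int) (r : List Int) :
    (sub.foldl (fun r v => (idx v).foldl (fun r pos => PySem.List.pySetD r pos 1) r) r).length
      = r.length := by
  induction sub generalizing r with
  | nil => rfl
  | cons v sub ih => simp [ih, length_mark_list]

-- One bucket's marking pass, pointwise.
theorem mark_list_getElem? (ps : List Int) (r : List Int) (i : Nat) (hi : i < r.length)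
    (hps : ∀ p ∈ ps, 0 ≤ p) :
    (ps.foldl (fun r pos => PySem.List.pySetD r pos 1) r)[i]?
      = if (i : Int) ∈ ps then some 1 else r[i]? := by
  induction ps generalizing r with
  | nil => simp
  | cons p ps ih =>
    have hp0 : 0 ≤ p := hps p (by simp)
    have hlen : (PySem.List.pySetD r p 1).length = r.length := PySem.List.length_pySetD ..
    rw [List.foldl_cons, ih (PySem.List.pySetD r p 1) (by omega) (fun q hq => hps q (by simp [hq]))]
    rw [PySem.List.pySetD_of_nonneg _ _ hp0]
    by_cases hmem : (i : Int) ∈ ps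
    · simp [hmem]
    · by_cases hip : (i : Int) = p
      · have : p.toNat = i := by omega
        simp [hip, this, hi]
      · have : p.toNat ≠ i := by omega
        simp [hmem, hip, this]

-- The whole marking phase, pointwise.
theorem mark_all_getElem? (idx : Int → List Int) (sub : List Int) (r : List Int) (i : Nat)
    (hi : i < r.length) (hidx : ∀ v, ∀ p ∈ idx v, 0 ≤ p) :
    (sub.foldl (fun r v => (idx v).foldl (fun r pos => PySem.List.pySetD r pos 1) r) r)[i]?
      = if ∃ v ∈ sub, (i : Int) ∈ idx v then some 1 else r[i]? := by
  induction sub generalizing r with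
  | nil => simp
  | cons v sub ih =>
    rw [List.foldl_cons,
        ih ((idx v).foldl (fun r pos => PySem.List.pySetD r pos 1) r)
          (by rw [length_mark_list]; exact hi),
        mark_list_getElem? (idx v) r i hi (hidx v)]
    by_cases h1 : ∃ w ∈ sub, (i : Int) ∈ idx w
    · simp [h1]
    · by_cases h2 : (i : Int) ∈ idx v
      · simp [h1, h2]
      · have : ¬ ∃ w ∈ v :: sub, (i : Int) ∈ idx w := by
          rintro ⟨w, hw, hmem⟩
          rcases List.mem_cons.mp hw with rfl | hw'
          · exact h2 hmem
          · exact h1 ⟨w, hw', hmem⟩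
        simp [h1, h2]

-- ===== VERDICT (by name: the statement is the Claim_ definition above) =====
theorem create_fm_col_spec : Claim_equal_create_fm_col := by
  intro all_gids subset_gids _
  unfold Spec_create_fm_col
  rw [createA_eq_map]
  unfold create_fm_col_alt
  set idxd := (PySem.List.enumerate all_gids).foldl
      (fun d p => d.insert p.2 (d.getD p.2 [] ++ [p.1])) PySem.Dict.empty with hidxd
  have hrep : PySem.List.pyRepeat [(0 : Int)] (all_gids.length : Int)
      = List.replicate all_gids.length (0 : Int) := by
    rw [PySem.List.pyRepeat_singleton]; simp
  have hpos : ∀ v, ∀ p ∈ idxd.getD v [], 0 ≤ p := by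
    intro v p hp
    rcases (mem_bucket all_gids v p).mp hp with ⟨k, hk, rfl, _⟩
    exact Int.natCast_nonneg k
  apply List.ext_getElem?
  intro i
  by_cases hi : i < all_gids.length
  · rw [mark_all_getElem? (fun v => idxd.getD v []) (PySem.Set.ofList subset_gids) _ i
        (by rw [hrep, List.length_replicate]; exact hi) hpos]
    have hA : (all_gids.map (fun v => if v ∈ subset_gids then (1 : Int) else 0))[i]?
        = some (if all_gids[i] ∈ subset_gids then (1 : Int) else 0) := by
      simp [List.getElem?_map, List.getElem?_eq_getElem hi]
    rw [hA]
    have hcond : (∃ v ∈ PySem.Set.ofList subset_gids, (i : Int) ∈ idxd.getD v [])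
        ↔ all_gids[i] ∈ subset_gids := by
      constructor
      · rintro ⟨v, hv', hmem⟩
        have hv : v ∈ subset_gids := (PySem.Set.mem_ofList _ _).mp hv'
        rcases (mem_bucket all_gids v (i : Int)).mp hmem with ⟨k, hk, hik, hkv⟩
        have : k = i := by omega
        subst this
        rwa [hkv]
      · intro h
        exact ⟨all_gids[i], (PySem.Set.mem_ofList _ _).mpr h,
          (mem_bucket all_gids all_gids[i] (i : Int)).mpr ⟨i, hi, rfl, rfl⟩⟩
    by_cases h : all_gids[i] ∈ subset_gids
    · rw [if_pos (hcond.mpr h), if_pos h]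
    · rw [if_neg (fun hc => h (hcond.mp hc)), if_neg h, hrep]
      simp [hi]
  · have h1 : (all_gids.map (fun v => if v ∈ subset_gids then (1 : Int) else 0))[i]? = none := by
      simp; omega
    have h2 : ((PySem.Set.ofList subset_gids).foldl (fun r v => (idxd.getD v []).foldl
        (fun r pos => PySem.List.pySetD r pos 1) r)
        (PySem.List.pyRepeat [(0 : Int)] (all_gids.length : Int)))[i]? = none := by
      apply List.getElem?_eq_none
      rw [length_mark_all, hrep, List.length_replicate]; omega
    rw [h1, h2]
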